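-- pv_equiv track=rewrite | github.com/uabbasi/good-measure-giving | data-pipeline/src/judges/diff_validator.py | _analyze_score_trend
-- ===== SOURCE A (Python) =====
-- def _analyze_score_trend(scores: list[int]) -> str:
--     """Analyze a series of scores to determine the trend.
--
--     Args:
--         scores: List of scores from oldest to newest
--
--     Returns:
--         Trend classification: 'improving', 'declining', 'stable', or 'volatile'
--     """
--     if len(scores) < 2:
--         return "unknown"
--
--     # Calculate differences between consecutive scores
--     diffs = [scores[i + 1] - scores[i] for i in range(len(scores) - 1)]
--
--     # Check for volatility (large swings in different directions)
--     positive_changes = sum(1 for d in diffs if d > 5)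
--     negative_changes = sum(1 for d in diffs if d < -5)
--
--     if positive_changes > 0 and negative_changes > 0:
--         return "volatile"
--
--     # Calculate overall direction
--     total_change = scores[-1] - scores[0]
--
--     if abs(total_change) <= 5:
--         return "stable"
--     elif total_change > 0:
--         return "improving"
--     else:
--         return "declining"
-- ===== SOURCE B (Python) =====
-- def _analyze_score_trend(scores: list[int]) -> str:
--     """Sort-then-inspect: sort the consecutive differences once and read the
--     extreme jumps off the two ends of the sorted list, instead of counting
--     scans over a diff list."""
--     if len(scores) < 2:
--         return "unknown"
--     ds = sorted(b - a for a, b in zip(scores, scores[1:]))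
--     if ds[-1] > 5 and ds[0] < -5:
--         return "volatile"
--     total_change = scores[-1] - scores[0]
--     if abs(total_change) <= 5:
--         return "stable"
--     if total_change > 0:
--         return "improving"
--     return "declining"
-- ===== Notes on version B (the rewrite author's own statement) =====
-- stated objective: alternative
-- what changed: B replaces A's counting scans over an index-built diff list with a sort-then-inspect strategy: the consecutive differences (built by zipping the list with its tail) are sorted once and volatility is read off the two ends of the sorted list (max jump > 5 and min jump < -5), which is correct because a >5/<-5 diff exists iff the sorted maximum/minimum crosses that threshold.
import Mathlib
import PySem

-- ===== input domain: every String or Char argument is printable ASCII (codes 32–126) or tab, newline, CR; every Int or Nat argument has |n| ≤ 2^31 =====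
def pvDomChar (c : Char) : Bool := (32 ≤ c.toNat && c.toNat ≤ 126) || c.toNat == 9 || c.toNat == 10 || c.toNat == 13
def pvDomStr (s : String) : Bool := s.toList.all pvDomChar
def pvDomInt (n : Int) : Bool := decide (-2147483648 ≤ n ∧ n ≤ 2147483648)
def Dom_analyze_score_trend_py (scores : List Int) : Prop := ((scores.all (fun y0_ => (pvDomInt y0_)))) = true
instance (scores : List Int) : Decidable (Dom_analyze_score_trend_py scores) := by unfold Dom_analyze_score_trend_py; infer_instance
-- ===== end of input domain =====

-- B replaces A's counting scans over an index-built diff list by sorting the zip-built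
-- differences once and reading the extreme jumps off the ends of the sorted list; objective: alternative.

-- ===== PORT A =====
def analyze_score_trend_py (scores : List Int) : String :=
  if scores.length < 2 then "unknown"
  else
    -- diffs = [scores[i+1] - scores[i] for i in range(len(scores)-1)]
    let diffs := (PySem.List.pyRange 0 ((scores.length : Int) - 1) 1).map
      (fun i => PySem.List.pyGetD scores (i + 1) 0 - PySem.List.pyGetD scores i 0)
    -- positive_changes = sum(1 for d in diffs if d > 5); negative_changes likewise
    let positive_changes := (diffs.map (fun d => if d > 5 then (1 : Int) else 0)).sum
    let negative_changes := (diffs.map (fun d => if d < -5 then (1 : Int) else 0)).sum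
    if positive_changes > 0 ∧ negative_changes > 0 then "volatile"
    else
      let total_change := PySem.List.pyGetD scores (-1) 0 - PySem.List.pyGetD scores 0 0
      if |total_change| ≤ 5 then "stable"
      else if total_change > 0 then "improving"
      else "declining"

-- ===== PORT B =====
def analyze_score_trend_py_alt (scores : List Int) : String :=
  if scores.length < 2 then "unknown"
  else
    -- ds = sorted(b - a for a, b in zip(scores, scores[1:]))
    let ds := PySem.List.sorted
      ((scores.zip (PySem.List.slice scores (some 1) none)).map (fun p => p.2 - p.1))
      (fun x => x) false
    if PySem.List.pyGetD ds (-1) 0 > 5 ∧ PySem.List.pyGetD ds 0 0 < -5 then "volatile"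
    else
      let total_change := PySem.List.pyGetD scores (-1) 0 - PySem.List.pyGetD scores 0 0
      if |total_change| ≤ 5 then "stable"
      else if total_change > 0 then "improving"
      else "declining"

-- ===== PRECONDITION & SPEC =====
def Spec_analyze_score_trend_py (scores : List Int) (out : String) : Prop := out = analyze_score_trend_py_alt scores
instance (scores : List Int) (out : String) : Decidable (Spec_analyze_score_trend_py scores out) := by unfold Spec_analyze_score_trend_py; infer_instance

-- ===== CLAIM (what is proved, stated in full; the proofs are below) =====
def Claim_equal_analyze_score_trend_py : Prop := ∀ (scores : List Int), Dom_analyze_score_trend_py scores → Spec_analyze_score_trend_py scores (analyze_score_trend_py scores)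

-- ===== LEMMAS AND PROOFS =====

/-- Consecutive differences, structurally. -/
def pvAdj : Int → List Int → List Int
  | _, [] => []
  | prev, x :: rest => (x - prev) :: pvAdj x rest

lemma pvDiffs_eq (a : Int) (l : List Int) :
    (List.range l.length).map
      (fun k => (a :: l).getD (k + 1) 0 - (a :: l).getD k 0) = pvAdj a l := by
  induction l generalizing a with
  | nil => simp [pvAdj]
  | cons x r ih =>
    simp only [List.length_cons, List.range_succ_eq_map, List.map_cons, List.map_map]
    simp only [pvAdj, List.getD_cons_succ, List.getD_cons_zero]
    refine congrArg _ ?_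
    have := ih x
    simpa [Function.comp] using this

lemma pvZip_eq (a : Int) (l : List Int) :
    ((a :: l).zip l).map (fun p => p.2 - p.1) = pvAdj a l := by
  induction l generalizing a with
  | nil => simp [pvAdj]
  | cons x r ih => simp [pvAdj, ih]

lemma pvAdj_ne_nil (a : Int) (l : List Int) (h : l ≠ []) : pvAdj a l ≠ [] := by
  cases l with
  | nil => exact absurd rfl h
  | cons x r => simp [pvAdj]

lemma pvCount_pos (l : List Int) (p : Int → Prop) [DecidablePred p] :
    (0 < (l.map (fun t => if p t then (1 : Int) else 0)).sum) ↔
      ∃ x ∈ l, p x := by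
  induction l with
  | nil => simp
  | cons x r ih =>
    simp only [List.map_cons, List.sum_cons]
    have hnn : 0 ≤ (r.map (fun t => if p t then (1 : Int) else 0)).sum := by
      apply List.sum_nonneg; intro y hy
      simp only [List.mem_map] at hy
      obtain ⟨t, _, rfl⟩ := hy
      split_ifs <;> norm_num
    split_ifs with h <;> simp [h, ih] <;> omega

lemma pvSorted_head_lt (l : List Int) (h : l ≠ []) :
    (PySem.List.pyGetD (PySem.List.sorted l (fun x => x) false) 0 0 < -5) ↔
      ∃ x ∈ l, x < -5 := by
  set s := PySem.List.sorted l (fun x => x) false with hs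
  have hsne : s ≠ [] := by
    rw [hs, Ne, PySem.List.sorted_eq_nil_iff]; exact h
  obtain ⟨m, t, hmt⟩ := List.exists_cons_of_ne_nil hsne
  have hmt' : PySem.List.sorted l (fun x => x) = m :: t := by rw [← hs]; exact hmt
  rw [hmt, PySem.List.pyGetD_zero_cons]
  constructor
  · intro hm
    refine ⟨m, ?_, hm⟩
    have hmem : m ∈ s := by rw [hmt]; exact List.mem_cons_self
    rwa [hs, PySem.List.mem_sorted] at hmem
  · rintro ⟨x, hx, hxlt⟩
    have hle := PySem.List.key_head_sorted_le l (fun x => x) hmt' x hx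
    simp only at hle
    exact lt_of_le_of_lt hle hxlt

lemma pvSorted_last_gt (l : List Int) (h : l ≠ []) :
    (5 < PySem.List.pyGetD (PySem.List.sorted l (fun x => x) false) (-1) 0) ↔
      ∃ x ∈ l, 5 < x := by
  set s := PySem.List.sorted l (fun x => x) false with hs
  have hsne : s ≠ [] := by
    rw [hs, Ne, PySem.List.sorted_eq_nil_iff]; exact h
  rw [PySem.List.pyGetD_neg_one s 0 hsne]
  have hmem : ∀ y ∈ l, y ≤ s.getLast hsne := by
    intro y hy
    have hys : y ∈ s := by rw [hs, PySem.List.mem_sorted]; exact hy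
    obtain ⟨i, hi, rfl⟩ := List.mem_iff_getElem.mp hys
    rw [List.getLast_eq_getElem]
    have hlen : s.length = (PySem.List.sorted l (fun x => x)).length := by rw [hs]
    have hmono := PySem.List.sorted_id_getElem_mono l (p := i) (q := s.length - 1)
      (by omega) (by omega)
    exact hmono
  constructor
  · intro hgt
    refine ⟨s.getLast hsne, ?_, hgt⟩
    have hmem2 : s.getLast hsne ∈ s := List.getLast_mem hsne
    exact (PySem.List.mem_sorted l (fun x => x) false _).mp hmem2
  · rintro ⟨x, hx, hxgt⟩
    exact lt_of_lt_of_le hxgt (hmem x hx)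

-- ===== VERDICT (by name: the statement is the Claim_ definition above) =====
theorem analyze_score_trend_py_spec : Claim_equal_analyze_score_trend_py := by
  intro scores _
  unfold Spec_analyze_score_trend_py analyze_score_trend_py analyze_score_trend_py_alt
  by_cases hlen : scores.length < 2
  · simp [hlen]
  · match scores, hlen with
    | a :: l, hl =>
      rw [if_neg hl, if_neg hl]
      have hne : l ≠ [] := by intro h; subst h; simp at hl
      have hslice : PySem.List.slice (a :: l) (some 1) none = l := by
        simpa using PySem.List.slice_from_one (a :: l)
      have hrange : (PySem.List.pyRange 0 (((a :: l).length : Int) - 1) 1).map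
          (fun i => PySem.List.pyGetD (a :: l) (i + 1) 0 - PySem.List.pyGetD (a :: l) i 0)
          = pvAdj a l := by
        have h1 : ((a :: l).length : Int) - 1 = (l.length : Int) := by simp
        rw [h1, PySem.List.pyRange_zero_natCast, List.map_map]
        rw [← pvDiffs_eq a l]
        apply List.map_congr_left
        intro k hk
        simp only [Function.comp]
        have : ((k : Int) + 1) = ((k + 1 : Nat) : Int) := by push_cast; ring
        rw [this, PySem.List.pyGetD_natCast, PySem.List.pyGetD_natCast]
      rw [hrange, hslice, pvZip_eq]
      rw [show (fun d => if d > 5 then (1:Int) else 0) = (fun t => if ((5 < ·) : Int → Prop) t then (1:Int) else 0) from rfl]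
      rw [show (fun d => if d < -5 then (1:Int) else 0) = (fun t => if ((· < -5) : Int → Prop) t then (1:Int) else 0) from rfl]
      have hadjne := pvAdj_ne_nil a l hne
      by_cases hu : ∃ x ∈ pvAdj a l, 5 < x <;>
        by_cases hd : ∃ x ∈ pvAdj a l, x < -5 <;>
          simp [pvCount_pos, pvSorted_head_lt _ hadjne, pvSorted_last_gt _ hadjne, hu, hd]
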